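-- pv_equiv track=rewrite | github.com/AACR1752/HouseXplainer | modules.py | remove_overlapping_features
-- ===== SOURCE A (Python) =====
-- def remove_overlapping_features(features):
--     # Convert all features to lowercase for case-insensitive comparison
--     features_lower = [feature.lower() for feature in features]
--     # Sort features by length in descending order to prioritize longer phrases
--     features_lower = sorted(features_lower, key=len, reverse=True)
--     unique_features = []
--
--     for feature in features_lower:
--         # Check if the feature is already part of any existing unique feature
--         if not any(feature in uf for uf in unique_features):
--             unique_features.append(feature)
--
--     # Map back to original case-sensitive features
--     return [feature for feature in features if feature.lower() in unique_features]
-- ===== SOURCE B (Python) =====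
-- def remove_overlapping_features(features):
--     # Distinct lowercase features; keep exactly the maximal ones, i.e. the
--     # distinct strings not contained in any *other* distinct string.
--     # (Substring containment is transitive, so no length sort / greedy
--     # accumulation is needed.)
--     distinct = list(dict.fromkeys(f.lower() for f in features))
--     kept = [x for x in distinct if not any(x != y and x in y for y in distinct)]
--     return [f for f in features if f.lower() in kept]
-- ===== Notes on version B (the rewrite author's own statement) =====
-- stated objective: simpler
-- what changed: Drops the length sort and the order-dependent greedy accumulation: B computes the kept set directly as the maximal elements of the distinct lowercase strings (those not a substring of any other distinct string), then filters the original list.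
import Mathlib
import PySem

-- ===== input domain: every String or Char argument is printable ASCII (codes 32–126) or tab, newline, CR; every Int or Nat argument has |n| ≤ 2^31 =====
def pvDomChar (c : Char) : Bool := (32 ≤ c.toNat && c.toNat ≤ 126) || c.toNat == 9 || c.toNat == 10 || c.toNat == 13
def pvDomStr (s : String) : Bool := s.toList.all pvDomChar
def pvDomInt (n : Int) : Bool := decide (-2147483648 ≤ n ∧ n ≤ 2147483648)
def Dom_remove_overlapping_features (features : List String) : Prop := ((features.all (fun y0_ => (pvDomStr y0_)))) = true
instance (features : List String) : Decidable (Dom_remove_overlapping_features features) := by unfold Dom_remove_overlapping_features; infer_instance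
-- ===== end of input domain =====

-- B replaces A's length-sort plus greedy accumulation by a direct, order-independent
-- computation of the maximal distinct lowercase strings (objective: simpler).

-- ===== PORT A =====
-- A-side helper: A's 'for feature in features_lower: if not any(...): append' loop as a fold
def pvGreedy (acc l : List String) : List String :=
  l.foldl (fun acc feature =>
    if acc.any (fun uf => PySem.Str.isIn feature uf) then acc else acc ++ [feature]) acc

def remove_overlapping_features (features : List String) : List String :=
  let features_lower := features.map PySem.Str.lower
  let features_lower := PySem.List.sorted features_lower PySem.Str.len true
  let unique_features := pvGreedy [] features_lower
  features.filter (fun feature => unique_features.contains (PySem.Str.lower feature))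

-- ===== PORT B =====
def remove_overlapping_features_alt (features : List String) : List String :=
  let distinct := PySem.List.dedup (features.map PySem.Str.lower)
  let kept := distinct.filter (fun x => !(distinct.any (fun y => x != y && PySem.Str.isIn x y)))
  features.filter (fun f => kept.contains (PySem.Str.lower f))

-- ===== PRECONDITION & SPEC =====
def Spec_remove_overlapping_features (features : List String) (out : List String) : Prop := out = remove_overlapping_features_alt features
instance (features : List String) (out : List String) : Decidable (Spec_remove_overlapping_features features out) := by unfold Spec_remove_overlapping_features; infer_instance

-- ===== CLAIM (what is proved, stated in full; the proofs are below) =====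
def Claim_equal_remove_overlapping_features : Prop := ∀ (features : List String), Dom_remove_overlapping_features features → Spec_remove_overlapping_features features (remove_overlapping_features features)

-- ===== LEMMAS AND PROOFS =====

theorem pvGreedy_nil (acc : List String) : pvGreedy acc [] = acc := rfl

theorem pvGreedy_cons (acc : List String) (f : String) (t : List String) :
    pvGreedy acc (f :: t) =
      pvGreedy (if acc.any (fun uf => PySem.Str.isIn f uf) then acc else acc ++ [f]) t := rfl

theorem mem_pvGreedy_of_mem {x : String} {acc : List String} (l : List String)
    (hx : x ∈ acc) : x ∈ pvGreedy acc l := by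
  induction l generalizing acc with
  | nil => simpa [pvGreedy_nil] using hx
  | cons f t ih =>
    rw [pvGreedy_cons]
    apply ih
    split
    · exact hx
    · exact List.mem_append_left _ hx

theorem mem_of_mem_pvGreedy {x : String} {acc l : List String}
    (hx : x ∈ pvGreedy acc l) : x ∈ acc ∨ x ∈ l := by
  induction l generalizing acc with
  | nil => exact Or.inl (by simpa [pvGreedy_nil] using hx)
  | cons f t ih =>
    rw [pvGreedy_cons] at hx
    rcases ih hx with h | h
    · split at h
      · exact Or.inl h
      · rcases List.mem_append.mp h with h | h
        · exact Or.inl h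
        · exact Or.inr (List.mem_cons.mpr (Or.inl (List.mem_singleton.mp h)))
    · exact Or.inr (List.mem_cons_of_mem _ h)

-- an infix-maximal element of l (relative to acc) survives the greedy loop
theorem maximal_mem_pvGreedy {s : String} {acc l : List String}
    (hs : s ∈ l)
    (hacc : ∀ a ∈ acc, s.toList <:+: a.toList → s = a)
    (hmax : ∀ y ∈ l, s.toList <:+: y.toList → s = y) :
    s ∈ pvGreedy acc l := by
  induction l generalizing acc with
  | nil => cases hs
  | cons f t ih =>
    rw [pvGreedy_cons]
    by_cases hsf : s = f
    · subst hsf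
      apply mem_pvGreedy_of_mem
      split
      · rename_i hany
        rcases List.any_eq_true.mp hany with ⟨a, ha, hin⟩
        have := hacc a ha ((PySem.Str.isIn_iff_infix _ _).mp hin)
        exact this ▸ ha
      · exact List.mem_append_right _ (List.mem_singleton.mpr rfl)
    · have hst : s ∈ t := (List.mem_cons.mp hs).resolve_left hsf
      apply ih hst
      · intro a ha hinf
        split at ha
        · exact hacc a ha hinf
        · rcases List.mem_append.mp ha with ha' | ha'
          · exact hacc a ha' hinf
          · have haf : a = f := List.mem_singleton.mp ha'
            subst haf
            exact hmax a (List.mem_cons_self) hinf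
      · exact fun y hy => hmax y (List.mem_cons_of_mem _ hy)

-- on a length-descending list the greedy result is an antichain for the infix order
theorem pvGreedy_antichain {acc l : List String}
    (hpw : l.Pairwise (fun a b => PySem.Str.len b ≤ PySem.Str.len a))
    (hacc : ∀ a ∈ acc, ∀ b ∈ acc, a.toList <:+: b.toList → a = b)
    (hlen : ∀ a ∈ acc, ∀ f ∈ l, PySem.Str.len f ≤ PySem.Str.len a) :
    ∀ x ∈ pvGreedy acc l, ∀ y ∈ pvGreedy acc l, x.toList <:+: y.toList → x = y := by
  induction l generalizing acc with
  | nil => simpa [pvGreedy_nil] using hacc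
  | cons f t ih =>
    rw [pvGreedy_cons]
    have hfge : ∀ g ∈ t, PySem.Str.len g ≤ PySem.Str.len f := (List.pairwise_cons.mp hpw).1
    have hpwt := (List.pairwise_cons.mp hpw).2
    split
    · exact ih hpwt hacc (fun a ha g hg =>
        le_trans (hfge g hg) (hlen a ha f List.mem_cons_self))
    · rename_i hnot
      apply ih hpwt
      · -- acc ++ [f] is still an antichain
        intro a ha b hb hinf
        rcases List.mem_append.mp ha with ha' | ha'
        · rcases List.mem_append.mp hb with hb' | hb'
          · exact hacc a ha' b hb' hinf
          · -- a ∈ acc, b = f : equal lengths force a = f, contradicting the failed any-test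
            have hbf : b = f := List.mem_singleton.mp hb'
            have h1 : a.toList.length ≤ b.toList.length := hinf.length_le
            have h2 : PySem.Str.len b ≤ PySem.Str.len a := by
              rw [hbf]; exact hlen a ha' f List.mem_cons_self
            rw [PySem.Str.len_eq, PySem.Str.len_eq] at h2
            have hlen_eq : a.toList.length = b.toList.length :=
              le_antisymm h1 (by exact_mod_cast h2)
            have hab : a = b := String.toList_inj.mp (hinf.eq_of_length hlen_eq)
            exfalso
            apply hnot
            refine List.any_eq_true.mpr ⟨a, ha', ?_⟩
            rw [show (PySem.Str.isIn f a) = (PySem.Str.isIn a a) from by rw [hab, hbf]]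
            exact (PySem.Str.isIn_iff_infix _ _).mpr (List.infix_refl _)
        · -- a = f, b ∈ acc : the any-test would have fired
          have haf : a = f := List.mem_singleton.mp ha'
          rcases List.mem_append.mp hb with hb' | hb'
          · exfalso
            apply hnot
            refine List.any_eq_true.mpr ⟨b, hb', ?_⟩
            rw [← haf]
            exact (PySem.Str.isIn_iff_infix _ _).mpr hinf
          · rw [haf, List.mem_singleton.mp hb']
      · intro a ha g hg
        rcases List.mem_append.mp ha with ha' | ha'
        · exact le_trans (hfge g hg) (hlen a ha' f List.mem_cons_self)
        · rw [List.mem_singleton.mp ha']; exact hfge g hg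

-- every element of L is an infix of some infix-maximal element of L
theorem pvExists_maximal {L : List String} {y : String} (hy : y ∈ L) :
    ∃ m ∈ L, y.toList <:+: m.toList ∧ ∀ z ∈ L, m.toList <:+: z.toList → m = z := by
  set C := L.filter (fun z => PySem.Str.isIn y z) with hC
  have hyC : y ∈ C := List.mem_filter.mpr
    ⟨hy, (PySem.Str.isIn_iff_infix _ _).mpr (List.infix_refl _)⟩
  have hCne : C ≠ [] := List.ne_nil_of_mem hyC
  rcases hh : C.argmax (fun s => s.toList.length) with _ | m
  · exact absurd (List.argmax_eq_none.mp hh) hCne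
  · have hm : m ∈ C.argmax (fun s => s.toList.length) := Option.mem_def.mpr hh
    have hmC : m ∈ C := List.argmax_mem hm
    have hmL : m ∈ L := (List.mem_filter.mp hmC).1
    have hym : y.toList <:+: m.toList :=
      (PySem.Str.isIn_iff_infix _ _).mp (List.mem_filter.mp hmC).2
    refine ⟨m, hmL, hym, fun z hz hmz => ?_⟩
    have hyz : y.toList <:+: z.toList := hym.trans hmz
    have hzC : z ∈ C := List.mem_filter.mpr ⟨hz, (PySem.Str.isIn_iff_infix _ _).mpr hyz⟩
    have hle : z.toList.length ≤ m.toList.length := List.le_of_mem_argmax (f := fun s : String => s.toList.length) hzC hm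
    exact String.toList_inj.mp (hmz.eq_of_length (le_antisymm hmz.length_le hle))

-- characterisation of A's unique_features: exactly the infix-maximal elements of L
theorem mem_pvGreedy_sorted_iff (L : List String) (s : String) :
    s ∈ pvGreedy [] (PySem.List.sorted L PySem.Str.len true) ↔
      s ∈ L ∧ ∀ y ∈ L, s.toList <:+: y.toList → s = y := by
  have hmemS : ∀ x : String, x ∈ PySem.List.sorted L PySem.Str.len true ↔ x ∈ L :=
    fun x => PySem.List.mem_sorted L _ true x
  constructor
  · intro h
    have hsL : s ∈ L := (hmemS s).mp ((mem_of_mem_pvGreedy h).resolve_left (by simp))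
    refine ⟨hsL, fun y hy hinf => ?_⟩
    obtain ⟨m, hmL, hym, hmmax⟩ := pvExists_maximal hy
    have hsm' : s.toList <:+: m.toList := hinf.trans hym
    have hmGreedy : m ∈ pvGreedy [] (PySem.List.sorted L PySem.Str.len true) :=
      maximal_mem_pvGreedy ((hmemS m).mpr hmL) (by simp)
        (fun z hz => hmmax z ((hmemS z).mp hz))
    have hanti := pvGreedy_antichain (acc := []) (l := PySem.List.sorted L PySem.Str.len true)
      (PySem.List.sorted_pairwise_rev L PySem.Str.len) (by simp) (by simp)
    have hsm : s = m := hanti s h m hmGreedy hsm'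
    -- y ⊑ m = s and s ⊑ y force s = y
    rw [hsm] at hinf ⊢
    exact (String.toList_inj.mp (hym.eq_of_length
      (le_antisymm hym.length_le hinf.length_le))).symm
  · rintro ⟨hsL, hmax⟩
    exact maximal_mem_pvGreedy ((hmemS s).mpr hsL) (by simp)
      (fun y hy => hmax y ((hmemS y).mp hy))

-- characterisation of B's kept: the same maximal elements
theorem mem_pvKept_iff (L : List String) (s : String) :
    s ∈ (PySem.List.dedup L).filter
        (fun x => !((PySem.List.dedup L).any (fun y => x != y && PySem.Str.isIn x y))) ↔
      s ∈ L ∧ ∀ y ∈ L, s.toList <:+: y.toList → s = y := by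
  rw [List.mem_filter]
  simp only [Bool.not_eq_eq_eq_not, Bool.not_true, List.any_eq_false, Bool.and_eq_true,
    bne_iff_ne, not_and, PySem.List.mem_dedup]
  constructor
  · rintro ⟨hs, h⟩
    refine ⟨hs, fun y hy hinf => ?_⟩
    by_contra hne
    exact (h y hy hne) ((PySem.Str.isIn_iff_infix _ _).mpr hinf)
  · rintro ⟨hs, h⟩
    refine ⟨hs, fun y hy hne hin => ?_⟩
    exact hne (h y hy ((PySem.Str.isIn_iff_infix _ _).mp hin))

-- ===== VERDICT (by name: the statement is the Claim_ definition above) =====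
theorem remove_overlapping_features_spec : Claim_equal_remove_overlapping_features := by
  intro features _hdom
  unfold Spec_remove_overlapping_features
  unfold remove_overlapping_features remove_overlapping_features_alt
  apply List.filter_congr
  intro f _hf
  rw [Bool.eq_iff_iff, List.contains_iff_mem, List.contains_iff_mem]
  exact (mem_pvGreedy_sorted_iff (features.map PySem.Str.lower) (PySem.Str.lower f)).trans
    (mem_pvKept_iff (features.map PySem.Str.lower) (PySem.Str.lower f)).symm
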